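-- pv_equiv track=rewrite | github.com/kreludan/337-recipetransformer | fetch_parse_page.py | deparenthesize
-- ===== SOURCE A (Python) =====
-- def deparenthesize(tokenized_phrase):   # stuff in parentheses most often seems like descriptors, so just doing that beforehand
--     parenthesized_indices = []
--     for i in range(0, len(tokenized_phrase)):
--         if tokenized_phrase[i] == '(':
--             parenthesized_indices.append(i)
--             for j in range(i+1, len(tokenized_phrase)):
--                 parenthesized_indices.append(j)
--                 if tokenized_phrase[j] == ')':
--                     break
--     deparenthesized = [tokenized_phrase[i] for i in range(0, len(tokenized_phrase)) if i not in parenthesized_indices]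
--     parenthesized = [tokenized_phrase[i] for i in range(0, len(tokenized_phrase)) if i in parenthesized_indices]
--     return [deparenthesized, parenthesized]
-- ===== SOURCE B (Python) =====
-- def deparenthesize(tokenized_phrase):
--     outside = []
--     inside = []
--     in_paren = False
--     for tok in tokenized_phrase:
--         if tok == '(':
--             in_paren = True
--         if in_paren:
--             inside.append(tok)
--         else:
--             outside.append(tok)
--         if tok == ')':
--             in_paren = False
--     return [outside, inside]
-- ===== Notes on version B (the rewrite author's own statement) =====
-- stated objective: simpler
-- what changed: Replaced A's nested index scans plus two 'i in list' membership comprehensions over ranges with one shorter linear pass that toggles an inside-parentheses flag and appends each token to the proper group directly.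
import Mathlib
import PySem

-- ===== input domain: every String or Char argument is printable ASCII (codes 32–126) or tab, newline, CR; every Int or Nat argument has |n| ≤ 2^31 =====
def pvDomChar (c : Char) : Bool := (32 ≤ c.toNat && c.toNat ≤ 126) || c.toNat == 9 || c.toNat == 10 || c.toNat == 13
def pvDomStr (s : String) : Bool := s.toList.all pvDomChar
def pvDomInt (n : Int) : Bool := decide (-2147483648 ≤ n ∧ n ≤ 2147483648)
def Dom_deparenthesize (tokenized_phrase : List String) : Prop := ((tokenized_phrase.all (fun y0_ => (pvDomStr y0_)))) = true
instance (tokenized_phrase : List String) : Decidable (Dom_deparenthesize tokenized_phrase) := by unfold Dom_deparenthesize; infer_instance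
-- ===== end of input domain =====

-- B replaces A's nested index scans and `i in list` membership tests by one shorter
-- linear pass with an inside-parentheses flag (objective: simpler; return value only, no mutation).

-- ===== PORT A =====
-- inner 'for j in range(i+1, len(..))' loop of A, with its 'break'; fuel = number of remaining js
def depInner (tp : List String) : Nat → Nat → List Nat → List Nat
  | _, 0, acc => acc
  | j, fuel+1, acc =>
      if tp.getD j "" = ")" then acc ++ [j]
      else depInner tp (j+1) fuel (acc ++ [j])

def deparenthesize (tokenized_phrase : List String) : List (List String) :=
  let n := tokenized_phrase.length
  let idxs := (List.range n).foldl (fun acc i =>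
      if tokenized_phrase.getD i "" = "(" then
        depInner tokenized_phrase (i+1) (n - (i+1)) (acc ++ [i])
      else acc) []
  let deparenthesized := (List.range n).filterMap fun i =>
      if i ∈ idxs then none else some (tokenized_phrase.getD i "")
  let parenthesized := (List.range n).filterMap fun i =>
      if i ∈ idxs then some (tokenized_phrase.getD i "") else none
  [deparenthesized, parenthesized]

-- ===== PORT B =====
def deparenthesize_alt (tokenized_phrase : List String) : List (List String) :=
  let st := tokenized_phrase.foldl (fun st tok =>
      let in_paren := if tok = "(" then true else st.2.2
      let st1 := if in_paren then (st.1, st.2.1 ++ [tok]) else (st.1 ++ [tok], st.2.1)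
      (st1.1, st1.2, if tok = ")" then false else in_paren))
    (([], [], false) : List String × List String × Bool)
  [st.1, st.2.1]

-- ===== PRECONDITION & SPEC =====
def Spec_deparenthesize (tokenized_phrase : List String) (out : List (List String)) : Prop := out = deparenthesize_alt tokenized_phrase
instance (tokenized_phrase : List String) (out : List (List String)) : Decidable (Spec_deparenthesize tokenized_phrase out) := by unfold Spec_deparenthesize; infer_instance

-- ===== CLAIM (what is proved, stated in full; the proofs are below) =====
def Claim_equal_deparenthesize : Prop := ∀ (tokenized_phrase : List String), Dom_deparenthesize tokenized_phrase → Spec_deparenthesize tokenized_phrase (deparenthesize tokenized_phrase)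

-- ===== LEMMAS AND PROOFS =====

-- the "currently inside parentheses" flag at position i, starting from flag f
def qf : Bool → List String → Nat → Bool
  | f, [], _ => f
  | f, t :: _, 0 => if t = "(" then true else f
  | f, t :: ts, i+1 => qf (if t = ")" then false else if t = "(" then true else f) ts i

-- closed-form "index i is marked": some '(' at k ≤ i with no ')' strictly between
def Qc (tp : List String) (i : Nat) : Prop :=
  ∃ k, k ≤ i ∧ tp.getD k "" = "(" ∧ ∀ m, k < m → m < i → tp.getD m "" ≠ ")"

-- structural version of B's fold: (outside, inside, final flag)
def splitq (f : Bool) : List String → List String × List String × Bool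
  | [] => ([], [], f)
  | t :: ts =>
      let f1 := if t = "(" then true else f
      let p := splitq (if t = ")" then false else f1) ts
      if f1 then (p.1, t :: p.2.1, p.2.2) else (t :: p.1, p.2.1, p.2.2)

theorem depInner_append (tp : List String) :
    ∀ (fuel : Nat) (j : Nat) (acc : List Nat),
      depInner tp j fuel acc = acc ++ depInner tp j fuel [] := by
  intro fuel
  induction fuel with
  | zero => intro j acc; simp [depInner]
  | succ fuel ih =>
      intro j acc
      simp only [depInner]
      split
      · simp
      · rw [ih (j+1) (acc ++ [j]), ih (j+1) ([] ++ [j])]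
        simp

theorem mem_depInner (tp : List String) :
    ∀ (fuel : Nat) (j i : Nat),
      i ∈ depInner tp j fuel [] ↔
        j ≤ i ∧ i < j + fuel ∧ ∀ m, j ≤ m → m < i → tp.getD m "" ≠ ")" := by
  intro fuel
  induction fuel with
  | zero => intro j i; simp [depInner]; omega
  | succ fuel ih =>
      intro j i
      simp only [depInner, List.nil_append]
      split
      · rename_i hj
        simp only [List.mem_singleton]
        constructor
        · rintro rfl
          exact ⟨le_refl _, by omega, fun m h1 h2 => by omega⟩
        · rintro ⟨h1, h2, h3⟩
          by_contra hne
          exact h3 j (le_refl j) (by omega) hj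
      · rename_i hj
        rw [depInner_append tp fuel (j+1) [j]]
        simp only [List.cons_append, List.nil_append, List.mem_cons]
        rw [ih (j+1) i]
        constructor
        · rintro (rfl | ⟨h1, h2, h3⟩)
          · exact ⟨le_refl _, by omega, fun m h1 h2 => by omega⟩
          · refine ⟨by omega, by omega, fun m hm1 hm2 => ?_⟩
            rcases Nat.eq_or_lt_of_le hm1 with rfl | hlt
            · exact hj
            · exact h3 m hlt hm2
        · rintro ⟨h1, h2, h3⟩
          rcases Nat.eq_or_lt_of_le h1 with rfl | hlt
          · exact Or.inl rfl
          · exact Or.inr ⟨by omega, by omega, fun m hm1 hm2 => h3 m (by omega) hm2⟩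

-- membership in A's parenthesized_indices list
theorem mem_idxs (tp : List String) (i : Nat) :
    (i ∈ (List.range tp.length).foldl (fun acc k =>
        if tp.getD k "" = "(" then depInner tp (k+1) (tp.length - (k+1)) (acc ++ [k])
        else acc) []) ↔ i < tp.length ∧ Qc tp i := by
  have hstep : (fun (acc : List Nat) k =>
      if tp.getD k "" = "(" then depInner tp (k+1) (tp.length - (k+1)) (acc ++ [k]) else acc)
      = fun acc k => acc ++ (if tp.getD k "" = "(" then
          k :: depInner tp (k+1) (tp.length - (k+1)) [] else []) := by
    funext acc k
    split
    · rw [depInner_append tp _ (k+1) (acc ++ [k])]; simp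
    · simp
  rw [hstep, PySem.List.foldl_append_eq_flatMap]
  simp only [List.nil_append, List.mem_flatMap, List.mem_range]
  constructor
  · rintro ⟨k, hk, hmem⟩
    by_cases hp : tp.getD k "" = "("
    · rw [if_pos hp] at hmem
      rcases List.mem_cons.mp hmem with heq | hmem
      · exact ⟨by omega, i, le_refl _, by rw [heq]; exact hp, fun m h1 h2 => by omega⟩
      · rw [mem_depInner] at hmem
        obtain ⟨h1, h2, h3⟩ := hmem
        refine ⟨by omega, k, by omega, hp, fun m hm1 hm2 => h3 m (by omega) hm2⟩
    · rw [if_neg hp] at hmem; simp at hmem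
  · rintro ⟨hi, k, hk, hp, hno⟩
    refine ⟨k, by omega, ?_⟩
    rw [if_pos hp]
    rcases Nat.eq_or_lt_of_le hk with rfl | hlt
    · exact List.mem_cons_self
    · refine List.mem_cons_of_mem _ ?_
      rw [mem_depInner]
      exact ⟨by omega, by omega, fun m h1 h2 => hno m (by omega) h2⟩

theorem qf_iff (tp : List String) :
    ∀ (i : Nat) (f : Bool),
      qf f tp i = true ↔
        (f = true ∧ ∀ m, m < i → tp.getD m "" ≠ ")") ∨ Qc tp i := by
  induction tp with
  | nil =>
      intro i f
      simp [qf, Qc]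
  | cons t ts ih =>
      intro i f
      cases i with
      | zero =>
          simp only [qf, Qc]
          by_cases hp : t = "("
          · exact iff_of_true (by simp [hp])
              (Or.inr ⟨0, le_refl _, by simp [hp], fun m h1 h2 => by omega⟩)
          · simp only [if_neg hp]
            constructor
            · intro hf
              exact Or.inl ⟨hf, fun m hm => by omega⟩
            · rintro (⟨hf, _⟩ | ⟨k, hk, hpar, _⟩)
              · exact hf
              · interval_cases k
                simp at hpar
                exact absurd hpar hp
      | succ i =>
          have haux1 : (∀ m, m < i + 1 → (t :: ts).getD m "" ≠ ")")
              ↔ (t ≠ ")" ∧ ∀ m, m < i → ts.getD m "" ≠ ")") := by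
            constructor
            · intro h
              exact ⟨h 0 (by omega), fun m hm => h (m+1) (by omega)⟩
            · rintro ⟨h0, h⟩ m hm
              cases m with
              | zero => exact h0
              | succ m => exact h m (by omega)
          have haux2 : Qc (t :: ts) (i + 1)
              ↔ (t = "(" ∧ ∀ m, m < i → ts.getD m "" ≠ ")") ∨ Qc ts i := by
            constructor
            · rintro ⟨k, hk, hpar, hno⟩
              cases k with
              | zero =>
                  exact Or.inl ⟨hpar, fun m hm => hno (m+1) (by omega) (by omega)⟩
              | succ k =>
                  exact Or.inr ⟨k, by omega, hpar, fun m h1 h2 => hno (m+1) (by omega) (by omega)⟩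
            · rintro (⟨hp, hP⟩ | ⟨k, hk, hp, hno⟩)
              · refine ⟨0, by omega, hp, fun m h1 h2 => ?_⟩
                cases m with
                | zero => omega
                | succ m => exact hP m (by omega)
              · refine ⟨k+1, by omega, hp, fun m h1 h2 => ?_⟩
                cases m with
                | zero => omega
                | succ m => exact hno m (by omega) (by omega)
          simp only [qf]
          rw [ih i _]
          rw [haux2]
          constructor
          · rintro (⟨hf, hP⟩ | hQ)
            · by_cases hcl : t = ")"
              · rw [hcl] at hf; simp at hf
              · by_cases hp : t = "("
                · exact Or.inr (Or.inl ⟨hp, hP⟩)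
                · rw [if_neg hcl, if_neg hp] at hf
                  exact Or.inl ⟨hf, haux1.mpr ⟨hcl, hP⟩⟩
            · exact Or.inr (Or.inr hQ)
          · rintro (⟨hf, hP⟩ | ⟨hp, hP⟩ | hQ)
            · obtain ⟨hcl, hP'⟩ := haux1.mp hP
              refine Or.inl ⟨?_, hP'⟩
              rw [if_neg hcl, hf]
              split <;> rfl
            · refine Or.inl ⟨?_, hP⟩
              have hcl : t ≠ ")" := by rw [hp]; decide
              rw [if_neg hcl, if_pos hp]
            · exact Or.inr hQ

theorem splitq_eq_filterMap (tp : List String) :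
    ∀ f : Bool,
      (splitq f tp).1 = ((List.range tp.length).filterMap fun i =>
          if qf f tp i = true then none else some (tp.getD i "")) ∧
      (splitq f tp).2.1 = ((List.range tp.length).filterMap fun i =>
          if qf f tp i = true then some (tp.getD i "") else none) := by
  induction tp with
  | nil => intro f; simp [splitq]
  | cons t ts ih =>
      intro f
      have hrange : List.range (t :: ts).length = 0 :: (List.range ts.length).map (· + 1) := by
        simp [List.range_succ_eq_map]
      rw [hrange]
      simp only [List.filterMap_cons, List.filterMap_map]
      have htail0 : ((List.range ts.length).filterMap
            ((fun i => if qf f (t :: ts) i = true then none else some ((t :: ts).getD i "")) ∘ (· + 1)))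
          = ((List.range ts.length).filterMap fun i =>
              if qf (if t = ")" then false else if t = "(" then true else f) ts i = true
              then none else some (ts.getD i "")) := by
        apply List.filterMap_congr
        intro i _
        simp [qf]
      have htail1 : ((List.range ts.length).filterMap
            ((fun i => if qf f (t :: ts) i = true then some ((t :: ts).getD i "") else none) ∘ (· + 1)))
          = ((List.range ts.length).filterMap fun i =>
              if qf (if t = ")" then false else if t = "(" then true else f) ts i = true
              then some (ts.getD i "") else none) := by
        apply List.filterMap_congr
        intro i _
        simp [qf]
      rw [htail0, htail1]
      obtain ⟨ih1, ih2⟩ := ih (if t = ")" then false else if t = "(" then true else f)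
      have hq0 : qf f (t :: ts) 0 = (if t = "(" then true else f) := by simp [qf]
      cases hf1 : (if t = "(" then true else f) with
      | true =>
          rw [hf1] at ih1 ih2
          simp only [splitq]
          rw [hf1]
          simp [hq0, hf1]
          simp at ih1 ih2
          exact ⟨ih1, ih2⟩
      | false =>
          rw [hf1] at ih1 ih2
          simp only [splitq]
          rw [hf1]
          simp [hq0, hf1]
          simp at ih1 ih2
          exact ⟨ih1, ih2⟩

theorem foldB_eq_splitq (tp : List String) :
    ∀ (o i : List String) (f : Bool),
      tp.foldl (fun st tok =>
        let in_paren := if tok = "(" then true else st.2.2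
        let st1 := if in_paren then (st.1, st.2.1 ++ [tok]) else (st.1 ++ [tok], st.2.1)
        (st1.1, st1.2, if tok = ")" then false else in_paren)) (o, i, f)
      = (o ++ (splitq f tp).1, i ++ (splitq f tp).2.1, (splitq f tp).2.2) := by
  induction tp with
  | nil => intro o i f; simp [splitq]
  | cons t ts ih =>
      intro o i f
      cases hf1 : (if t = "(" then true else f) with
      | true =>
          have hstep : List.foldl (fun (st : List String × List String × Bool) tok =>
        let in_paren := if tok = "(" then true else st.2.2
        let st1 := if in_paren then (st.1, st.2.1 ++ [tok]) else (st.1 ++ [tok], st.2.1)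
        (st1.1, st1.2, if tok = ")" then false else in_paren)) (o, i, f) (t :: ts)
              = List.foldl (fun (st : List String × List String × Bool) tok =>
        let in_paren := if tok = "(" then true else st.2.2
        let st1 := if in_paren then (st.1, st.2.1 ++ [tok]) else (st.1 ++ [tok], st.2.1)
        (st1.1, st1.2, if tok = ")" then false else in_paren)) (o, i ++ [t], if t = ")" then false else true) ts := by
            rw [List.foldl_cons]
            congr 1
            simp [hf1]
          rw [hstep, ih o (i ++ [t]) (if t = ")" then false else true)]
          simp only [splitq]
          rw [hf1]
          simp
      | false =>
          have hstep : List.foldl (fun (st : List String × List String × Bool) tok =>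
        let in_paren := if tok = "(" then true else st.2.2
        let st1 := if in_paren then (st.1, st.2.1 ++ [tok]) else (st.1 ++ [tok], st.2.1)
        (st1.1, st1.2, if tok = ")" then false else in_paren)) (o, i, f) (t :: ts)
              = List.foldl (fun (st : List String × List String × Bool) tok =>
        let in_paren := if tok = "(" then true else st.2.2
        let st1 := if in_paren then (st.1, st.2.1 ++ [tok]) else (st.1 ++ [tok], st.2.1)
        (st1.1, st1.2, if tok = ")" then false else in_paren)) (o ++ [t], i, false) ts := by
            rw [List.foldl_cons]
            congr 1
            simp [hf1]
          rw [hstep, ih (o ++ [t]) i false]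
          simp only [splitq]
          rw [hf1]
          simp

-- ===== VERDICT (by name: the statement is the Claim_ definition above) =====
theorem deparenthesize_spec : Claim_equal_deparenthesize := by
  intro tp _
  unfold Spec_deparenthesize
  simp only [deparenthesize, deparenthesize_alt]
  rw [foldB_eq_splitq tp [] [] false]
  obtain ⟨h1, h2⟩ := splitq_eq_filterMap tp false
  simp only [List.nil_append, h1, h2]
  have hcond : ∀ i ∈ List.range tp.length,
      ((i ∈ (List.range tp.length).foldl (fun acc k =>
          if tp.getD k "" = "(" then depInner tp (k+1) (tp.length - (k+1)) (acc ++ [k])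
          else acc) []) ↔ (qf false tp i = true)) := by
    intro i hi
    have hi' : i < tp.length := List.mem_range.mp hi
    rw [mem_idxs, qf_iff]
    simp [hi']
  simp only [List.cons.injEq, and_true]
  constructor
  · apply List.filterMap_congr
    intro i hi
    exact if_congr (hcond i hi) rfl rfl
  · apply List.filterMap_congr
    intro i hi
    exact if_congr (hcond i hi) rfl rfl
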